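-- pv_equiv track=rewrite | github.com/newdataengg/DE-SB-SparkMiniProject | autoinc_spark.py | populate_make
-- ===== SOURCE A (Python) =====
-- def populate_make(records):
--     make = None
--     year = None
--     output = []
--
--     # First, find the 'I' record (initial sale) to get make and year
--     for rec in records:
--         if rec[0] == "I":
--             make = rec[1]
--             year = rec[2]
--             break
--
--     # Then, for all 'A' records, attach make and year
--     for rec in records:
--         if rec[0] == "A" and make and year:
--             output.append((make + "-" + year, 1))
--
--     return output
-- ===== SOURCE B (Python) =====
-- def populate_make(records):
--     # Group the records by their type tag in one dict-building pass,
--     # then read the answer off the two relevant groups.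
--     groups = {}
--     for rec in records:
--         groups.setdefault(rec[0], []).append(rec)
--     i_records = groups.get("I", [])
--     if not i_records:
--         return []
--     first_i = i_records[0]
--     make, year = first_i[1], first_i[2]
--     if not (make and year):
--         return []
--     return [(make + "-" + year, 1)] * len(groups.get("A", []))
-- ===== Notes on version B (the rewrite author's own statement) =====
-- stated objective: alternative
-- what changed: B replaces A's two staged scans with carried make/year state by a single dict-grouping pass (records bucketed by type tag), then reads the first 'I' group element for the tag and replicates (tag, 1) by the size of the 'A' group.
import Mathlib
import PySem

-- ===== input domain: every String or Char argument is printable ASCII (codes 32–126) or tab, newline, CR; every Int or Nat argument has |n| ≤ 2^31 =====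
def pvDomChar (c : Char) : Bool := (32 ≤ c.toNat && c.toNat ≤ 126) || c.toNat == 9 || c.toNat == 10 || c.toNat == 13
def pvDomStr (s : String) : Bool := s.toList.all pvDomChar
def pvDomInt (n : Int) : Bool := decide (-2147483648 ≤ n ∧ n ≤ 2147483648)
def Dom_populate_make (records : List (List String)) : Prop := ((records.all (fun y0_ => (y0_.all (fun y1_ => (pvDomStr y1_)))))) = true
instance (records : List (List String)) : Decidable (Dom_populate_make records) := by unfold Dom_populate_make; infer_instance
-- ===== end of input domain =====

-- B buckets the records by type tag in one dict-grouping pass and reads the answer off the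
-- 'I' and 'A' groups, instead of A's two staged scans with carried make/year state (objective: alternative).

-- ===== PORT A =====
-- Python truthiness of `make` / `year` (None and "" are falsy)
def pvTruthy (o : Option String) : Bool :=
  match o with
  | none => false
  | some s => s != ""

-- first loop of A: scan for the first record with rec[0] == "I", take (rec[1], rec[2]), break
def pvFindIY : List (List String) → Option String × Option String
  | [] => (none, none)
  | rec :: rest =>
    if (PySem.List.pyGet? rec 0).getD "" == "I" then
      (PySem.List.pyGet? rec 1, PySem.List.pyGet? rec 2)
    else pvFindIY rest

def populate_make (records : List (List String)) : List (String × Int) :=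
  let my := pvFindIY records
  records.foldl (fun output rec =>
    if ((PySem.List.pyGet? rec 0).getD "" == "A") && pvTruthy my.1 && pvTruthy my.2 then
      output ++ [(my.1.getD "" ++ "-" ++ my.2.getD "", 1)]
    else output) []

-- ===== PORT B =====
def populate_make_alt (records : List (List String)) : List (String × Int) :=
  -- groups = {}; for rec in records: groups.setdefault(rec[0], []).append(rec)
  let groups := records.foldl
    (fun d rec => d.modify ((PySem.List.pyGet? rec 0).getD "") [] (· ++ [rec]))
    PySem.Dict.empty
  match groups.getD "I" [] with
  | [] => []                                   -- if not i_records: return []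
  | first_i :: _ =>
    let make := (PySem.List.pyGet? first_i 1).getD ""
    let year := (PySem.List.pyGet? first_i 2).getD ""
    if make == "" || year == "" then []        -- if not (make and year): return []
    else List.replicate (groups.getD "A" []).length (make ++ "-" ++ year, 1)

-- ===== PRECONDITION & SPEC =====
-- Pre_ excludes exactly the inputs where the Python A raises IndexError: a record that is the
-- empty list (rec[0]), or a first 'I' record shorter than 3 fields (rec[1]/rec[2]).
def Pre_populate_make (records : List (List String)) : Prop :=
  (∀ rec ∈ records, rec ≠ []) ∧
  (∀ fi ∈ records.find? (fun rec => (PySem.List.pyGet? rec 0).getD "" == "I"), 3 ≤ fi.length)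
instance (records : List (List String)) : Decidable (Pre_populate_make records) := by
  unfold Pre_populate_make; infer_instance

def pvWitness_populate_make : List (List String) :=
  [["I", "Honda", "2020"], ["A", "x"], ["A", "y"], ["X"]]

def Spec_populate_make (records : List (List String)) (out : List (String × Int)) : Prop := out = populate_make_alt records
instance (records : List (List String)) (out : List (String × Int)) : Decidable (Spec_populate_make records out) := by unfold Spec_populate_make; infer_instance

-- ===== CLAIM (what is proved, stated in full; the proofs are below) =====
def Claim_equal_populate_make : Prop := ∀ (records : List (List String)), Dom_populate_make records → Pre_populate_make records → Spec_populate_make records (populate_make records)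

-- ===== LEMMAS AND PROOFS =====

-- the grouping dict's entry for tag c is the sublist of records whose first field is c
theorem groups_getD (records : List (List String)) (c : String) :
    (records.foldl
      (fun d rec => d.modify ((PySem.List.pyGet? rec 0).getD "") [] (· ++ [rec]))
      PySem.Dict.empty).getD c []
    = records.filter (fun rec => (PySem.List.pyGet? rec 0).getD "" == c) := by
  have h := PySem.Dict.getD_foldl_modify_append
    (l := records.map (fun rec => ((PySem.List.pyGet? rec 0).getD "", rec)))
    (d := (PySem.Dict.empty : PySem.Dict String (List (List String)))) (c := c)
  rw [List.foldl_map] at h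
  simpa [List.filter_map, Function.comp_def] using h

-- the head of the 'I' group is A's first-loop find
theorem head?_filter_eq_find? (p : List String → Bool) (l : List (List String)) :
    (l.filter p).head? = l.find? p := by
  induction l with
  | nil => rfl
  | cons x xs ih => by_cases h : p x <;> simp [h, ih]

-- A's second loop appends the same fixed pair for each record satisfying c
theorem foldl_append_replicate (c : List String → Bool)
    (v : String × Int) (records : List (List String)) (acc : List (String × Int)) :
    records.foldl (fun output rec => if c rec then output ++ [v] else output) acc
      = acc ++ List.replicate (records.countP c) v := by
  induction records generalizing acc with
  | nil => simp
  | cons rec rest ih =>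
    cases h : c rec <;>
      simp [h, ih, List.replicate_succ, List.append_assoc]

-- when the truthiness test fails, A's loop condition is everywhere false
theorem foldl_false (c : List String → Bool) (v : String × Int)
    (records : List (List String)) (hc : ∀ rec, c rec = false) :
    records.foldl (fun output rec => if c rec then output ++ [v] else output) [] = [] := by
  rw [foldl_append_replicate c v records []]
  have h0 : records.countP c = 0 := List.countP_eq_zero.mpr (fun rec _ => by simp [hc rec])
  simp [h0]

-- pvFindIY returns fields 1 and 2 of the first 'I' record
theorem pvFindIY_eq_find? (records : List (List String)) :
    pvFindIY records =
      match records.find? (fun rec => (PySem.List.pyGet? rec 0).getD "" == "I") with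
      | none => (none, none)
      | some fi => (PySem.List.pyGet? fi 1, PySem.List.pyGet? fi 2) := by
  induction records with
  | nil => rfl
  | cons rec rest ih =>
    simp only [pvFindIY, List.find?_cons]
    by_cases h : ((PySem.List.pyGet? rec 0).getD "" == "I") = true <;> simp [h, ih]

-- ===== VERDICT (by name: the statement is the Claim_ definition above) =====
theorem populate_make_spec : Claim_equal_populate_make := by
  intro records _ hpre
  unfold Spec_populate_make populate_make populate_make_alt
  rcases hpre with ⟨-, hlen⟩
  simp only [groups_getD]
  rcases hfind : records.find? (fun rec => (PySem.List.pyGet? rec 0).getD "" == "I") with _ | fi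
  · -- no 'I' record: the 'I' group is empty (B), make = year = None so A's loop is inert
    have hfilt : records.filter (fun rec => (PySem.List.pyGet? rec 0).getD "" == "I") = [] := by
      have := head?_filter_eq_find? (fun rec => (PySem.List.pyGet? rec 0).getD "" == "I") records
      rw [hfind] at this
      exact List.head?_eq_none_iff.mp this
    have hmy : pvFindIY records = (none, none) := by rw [pvFindIY_eq_find?, hfind]
    simp only [hmy, hfilt]
    exact foldl_false _ _ records (by intro rec; simp [pvTruthy])
  · -- first 'I' record found: it is the head of the 'I' group; Pre_ gives it ≥ 3 fields
    have hhead : (records.filter (fun rec => (PySem.List.pyGet? rec 0).getD "" == "I")).head? = some fi := by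
      rw [head?_filter_eq_find?, hfind]
    rcases hfp : records.filter (fun rec => (PySem.List.pyGet? rec 0).getD "" == "I") with _ | ⟨f0, rest⟩
    · rw [hfp] at hhead; simp at hhead
    · rw [hfp] at hhead
      simp only [List.head?_cons, Option.some.injEq] at hhead
      subst hhead
      have h3 : 3 ≤ f0.length := hlen f0 (by simp [hfind])
      have hmy : pvFindIY records = (PySem.List.pyGet? f0 1, PySem.List.pyGet? f0 2) := by
        rw [pvFindIY_eq_find?, hfind]
      obtain ⟨m, h1⟩ : ∃ m, PySem.List.pyGet? f0 1 = some m :=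
        ⟨_, PySem.List.pyGet?_ofNat f0 1 (by omega)⟩
      obtain ⟨y, h2⟩ : ∃ y, PySem.List.pyGet? f0 2 = some y :=
        ⟨_, PySem.List.pyGet?_ofNat f0 2 (by omega)⟩
      simp only [hmy, hfp, h1, h2, Option.getD_some]
      by_cases hm : m = ""
      · rw [if_pos (by simp [hm])]
        exact foldl_false _ _ records (by intro rec; simp [pvTruthy, hm])
      · by_cases hy : y = ""
        · rw [if_pos (by simp [hy])]
          exact foldl_false _ _ records (by intro rec; simp [pvTruthy, hy])
        · rw [if_neg (by simp [hm, hy])]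
          have hbm : (m != "") = true := by simp [hm]
          have hby : (y != "") = true := by simp [hy]
          simp only [pvTruthy, hbm, hby, Bool.and_true]
          rw [foldl_append_replicate
            (fun rec => (PySem.List.pyGet? rec 0).getD "" == "A") (m ++ "-" ++ y, 1) records []]
          simp [List.countP_eq_length_filter]
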